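/- GENERATED by mk_final_copies.py from the proof of the farm's unit `start_decoder.R17` (farm:start_decoder.R17.1: Lemmas.lean) as the
   re-elaboration sweep compiled it — do not edit. -/
import Asan.CheckWalk
import Vorbis.Spec.Units.start_decoder_R17
open X86 X86.User Asan Vorbis Vorbis.Spec Vorbis.Spec.StartDecoder

set_option maxRecDepth 4000
set_option maxHeartbeats 4000000

/-! The pure lemmas of unit `start_decoder.R17`: the frame of `Late` over the segment's footprint (`late_frame`, `r17_carry`), the
error exit from `Late` (`late_failed`), where `*f` is (`obj_where`), the estimate read back (`maxPartRead_frame`), and the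
bit-level forms of the walker as numbers. -/

namespace Vorbis.Spec.start_decoder_R17


/-- The windows of `*f` that this segment leaves alone: everything but `setup_memory_required`, `temp_memory_required`
(`[8, 16)`) and `error` (`[140, 144)`). -/
def r17Wins : Wins := [(0, 8), (16, 140), (144, 1808)]

/-- **FRAME of `Late`** over the stores of this segment. -/
theorem late_frame {g : Ghost} {A9 A10 : Arena} {A : Arena × List Obj} {mem mem' : Mem}
    (h : Late g 12 A9 A10 A mem)
    (he : ObjEq r17Wins mem g.f mem' g.f)
    (hk : AllKept A.1.Blk mem mem')
    (hconsts : SDFrameConsts 12 mem' g.R)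
    (hsh : Mem.EqOn 0xC00000 0xE00000 mem mem') : Late g 12 A9 A10 A mem' := by
  have hown := h.own
  have hC : stb_vorbis.channels mem g.f ≤ 16 := h.header.HD1.2
  have up9 : ∀ B, A9.Blk B → B.Kept mem mem' := fun B hB => hk B (hown.up9 B hB)
  have up10 : ∀ B, Since A9 A10 B → B.Kept mem mem' := fun B hB => hk B (hown.up10 B hB)
  have hfloor := hown.cfg.floor (by omega)
  refine ⟨h.env.eqOn hsh, hconsts, ?_, h.noTemps, ?_, ?_, ?_, ?_, ⟨hown.ext9, hown.ext10, ?_, ?_, ?_, ?_⟩, ?_, ?_⟩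
  · exact h.arena.transfer (he.sub (by decide))
  · exact h.bits.transfer (he.sub (by decide)) ⟨h.bits.OB1, h.bits.OB1a⟩ h.bits.OBR h.bits.S2
  · have e : stb_vorbis.first_decode mem' g.f = stb_vorbis.first_decode mem g.f := by
      simp only [vacc, voff]
      exact he.u8 1749 (by decide)
    rw [e]
    exact h.first
  · have e : stb_vorbis.discard_samples_deferred mem' g.f = stb_vorbis.discard_samples_deferred mem g.f := by
      simp only [vacc, voff]
      exact he.i32 1784 (by decide)
    rw [e]
    exact h.discard0
  · exact h.header.transfer (he.sub (by decide))
  · exact hown.cfg.frame (he.sub (by decide)) up9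
  · exact hown.m6.transfer (he.sub (by decide)) hC (fun _ _ hb => hb)
  · -- FY1: field by field (`FY1.transfer` wants the floor shape over the SAME predicate; here it is over `A9.Blk`)
    have hkept := up9 _ hfloor.FL2
    have he' : ObjEq FY1.wins mem g.f mem' g.f := he.sub (by decide)
    apply hown.fy.transfer_of_eq _ _ _ _ _ (fun _ _ hb => hb)
    · simp only [vacc, voff]
      exact he'.i32 4 (by decide)
    · intro c hc
      simp only [vacc, voff]
      rw [Nat.add_assoc g.f]
      exact he'.u64 (1264 + 8 * c) (InWins.of_mem (1264, 1392) (by decide) (by omega) (by omega))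
    · simp only [vacc, voff]
      exact he'.i32 176 (by decide)
    · simp only [vacc, voff]
      exact he'.u64 312 (by decide)
    · intro i hi
      have hg : IsFloor mem g.f (stb_vorbis.floor_config_at mem g.f i) := IsFloor.of_lt hi
      have hek := hfloor.toFloorShape.elem_kept hg hkept
      have hin := hek.inside
      simp only [] at hin
      exact Floor1.same_values hek.same hin
  · exact hown.mdct.transfer (he.sub (by decide)) (fun B hR => hk B (hown.mdct.reads_blk hR).1) (fun _ _ hb => hb)
  · exact h.mode.transfer (he.sub (by decide))
  · have e : stb_vorbis.previous_length mem' g.f = stb_vorbis.previous_length mem g.f := by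
      simp only [vacc, voff]
      exact he.i32 1256 (by decide)
    rw [e]
    exact h.m7

/-- **An error exit with every group finished** (`call error ; jmp 113b22`): SD.ERR from `Late` (as `Mid.failed_late`). -/
theorem late_failed {g : Ghost} {kc : Nat} {A9 A10 : Arena} {A : Arena × List Obj} {mem : Mem}
    (h : Late g kc A9 A10 A mem) : Failed g.len g.f (g.Live A) A mem := by
  have up : ∀ B, A9.Blk B → g.Blk A B := fun B hB => runBlk_setup (h.own.up9 B hB)
  have hcfg := h.own.cfg
  have h1 : H1 (g.Blk A) mem g.f := H1.mono (CommentsOK.h1 (hcfg.comment (by omega))) up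
  have h4 : H4 (g.Blk A) mem g.f := H4.mono (CB0.h4 (hcfg.cb0 (by omega))) up
  have h2 : H2 (g.Blk A) mem g.f := H2.mono (ResidueOK.h2 (hcfg.residue (by omega))) up
  have h3 : H3 (g.Blk A) mem g.f := H3.mono (ResidueOK.h3 (hcfg.residue (by omega)) (hcfg.nonnull (by omega))) up
  have h5 : H5 (g.Blk A) mem g.f := H5.mono (MappingOK.h5 (hcfg.mapping (by omega))) up
  refine ⟨⟨h.env, ⟨Bits.ob1 h.bits, ArenaOK.alloc_buffer_ne_zero h.arena, h1, h2, h3, h4, h5⟩, h.bits⟩, h.arena.AR1, ?_⟩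
  intro o ho
  apply h.arena.AR6 o
  unfold Arena.objs
  exact List.mem_append_left _ ho


/-- The live objects inside the function contain those of the callers. -/
theorem frames_sub (g : Ghost) (others : List Obj) (o : Obj) (ho : o ∈ stackObjs g.frames ++ others) :
    o ∈ stackObjs g.frames' ++ others := by
  unfold Ghost.frames'
  rw [stackObjs_cons]
  rcases List.mem_append.mp ho with h1 | h2
  · exact List.mem_append_left _ (List.mem_append_right _ h1)
  · exact List.mem_append_right _ h2

/-- **Where `*f` is**: a stack object of a CALLER's frame (above the return-address slot) or an object off the stack; above
the image's text, inside the data space. One arithmetic fact for the walk. -/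
theorem obj_where {u₀ : State} {g : Ghost} {pc : Word} {A : Arena × List Obj} {v : State}
    (hfr : Frame u₀ g pc A v) (hh : g.Hand A) :
    0x119d40 ≤ g.f ∧ g.f + 1808 ≤ 0xC00000 ∧
      ((g.e.reg .rsp).toNat + 8 ≤ g.f ∨ g.f + 1808 ≤ 0x700000 ∨ 0x800000 ≤ g.f) := by
  have hlive : LiveIn A.2 g.frames' g.f Off.sizeof.stb_vorbis := hh.obj.mono (frames_sub g A.2)
  have hw := hlive.where_ hfr.shadow hfr.offText (by decide)
  simp only [Vorbis.Off.sizeof.stb_vorbis] at hw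
  obtain ⟨hw1, hw2, _⟩ := hw
  refine ⟨hw1, hw2, ?_⟩
  obtain ⟨o, ho, k1, k2⟩ := hh.obj
  simp only [Vorbis.Off.sizeof.stb_vorbis] at k2
  rcases List.mem_append.mp ho with hs | hoth
  · -- a stack object of a caller's frame: the frame lies above the return-address slot
    unfold stackObjs at hs
    obtain ⟨bF, hbF, hin⟩ := List.mem_flatMap.mp hs
    have hbF' : bF ∈ g.frames' := List.mem_cons_of_mem _ hbF
    obtain ⟨a1, a8, _, _, _⟩ := hfr.shadow.stack.active bF hbF'
    have hgr := FrameLayout.objsAt_gran a1 a8 hin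
    have hcall := hfr.callers bF hbF
    have hRA : g.RA = (g.e.reg .rsp).toNat := rfl
    have hal := hfr.entry.align
    have e : o.gLo = o.base / 8 := rfl
    left
    omega
  · have hoff := hfr.shadow.off o hoth
    unfold OffStack at hoff
    omega



/-- The footprint of this segment relative to its entry state: the return addresses of the check calls and `error`'s frame
below rsp; `temp_memory_required`; `error`. -/
def segSpans (g : Ghost) : List Span := [⟨g.R - 64, g.R⟩, ⟨g.f + 12, g.f + 16⟩, ⟨g.f + 140, g.f + 144⟩]

/-- A read of the own frame at or above rsp, through the segment's footprint. -/
theorem r17_read {g : Ghost} {mem mem' : Mem} (hs : Mem.SameExcept (segSpans g) mem mem') (a k : Nat)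
    (h1 : g.R ≤ a) (h2 : a + k ≤ g.f + 12 ∨ g.f + 144 ≤ a) (h3 : a + k < 2 ^ 64) :
    mem'.readLE (addr a) k = mem.readLE (addr a) k := by
  have e : (addr a).toNat = a := toNat_addr a (by omega)
  apply hs.readLE (addr a) k (by omega)
  intro w hw
  simp only [segSpans, List.mem_cons, List.mem_nil_iff, or_false] at hw
  rw [e]
  rcases hw with rfl | rfl | rfl
  · simp only []
    omega
  · simp only []
    omega
  · simp only []
    omega

/-- **What the segment's footprint keeps**: the common part `Frame` at the new program counter, the invariant `Late`, and the
three facts from which every other field of an exit assertion is read back (`ObjEq` of the kept windows of `*f`, every arena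
block kept, the spill slots `[R + 8, R + 28H)`). -/
theorem r17_carry {u₀ : State} {g : Ghost} {pc pc' : Word} {A9 A10 : Arena} {A : Arena × List Obj} {v s : State}
    (hfr : Frame u₀ g pc A v) (hh : g.Hand A) (hl : Late g 12 A9 A10 A v.mem)
    (hrip : s.rip = pc') (hrsp : s.reg .rsp = addr g.R) (hcode : CodeOK u₀ s.mem) (hinv : abiInv s)
    (hs : Mem.SameExcept (segSpans g) v.mem s.mem) :
    Frame u₀ g pc' A s ∧ Late g 12 A9 A10 A s.mem ∧ ObjEq r17Wins v.mem g.f s.mem g.f ∧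
      AllKept A.1.Blk v.mem s.mem ∧ Mem.EqOn (g.R + 8) (g.R + 0x28) v.mem s.mem := by
  obtain ⟨hR1, hR8⟩ := hfr.r_eq
  obtain ⟨ha8, hroom, htop⟩ := hfr.ra
  have hRA : g.RA = (g.e.reg .rsp).toNat := rfl
  simp only [steady, depth] at hR1 hroom
  obtain ⟨hf1, hf2, hf3⟩ := obj_where hfr hh
  rw [← hRA] at hf3
  have hobr := hl.bits.OBR
  simp only [Vorbis.Off.sizeof.stb_vorbis] at hobr
  -- the shadow, the spill slots
  have hun : ShadowUntouched v.mem s.mem := by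
    apply hs.eqOn
    intro w hw
    simp only [segSpans, List.mem_cons, List.mem_nil_iff, or_false] at hw
    rcases hw with rfl | rfl | rfl
    · simp only []
      omega
    · simp only []
      omega
    · simp only []
      omega
  have hslots : Mem.EqOn (g.R + 8) (g.R + 0x28) v.mem s.mem := by
    apply hs.eqOn
    intro w hw
    simp only [segSpans, List.mem_cons, List.mem_nil_iff, or_false] at hw
    rcases hw with rfl | rfl | rfl
    · simp only []
      omega
    · simp only []
      omega
    · simp only []
      omega
  -- the windows of `*f`
  have hobj : ObjEq r17Wins v.mem g.f s.mem g.f := by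
    apply ObjEq.of_sameExcept hs
    · intro w hw
      simp only [r17Wins, List.mem_cons, List.mem_nil_iff, or_false] at hw
      rcases hw with rfl | rfl | rfl
      · simp only []
        omega
      · simp only []
        omega
      · simp only []
        omega
    · intro w hw sp hsp
      simp only [r17Wins, List.mem_cons, List.mem_nil_iff, or_false] at hw
      simp only [segSpans, List.mem_cons, List.mem_nil_iff, or_false] at hsp
      rcases hw with rfl | rfl | rfl <;> rcases hsp with rfl | rfl | rfl <;> simp only [] <;> omega
  -- the arena's blocks: inside the arena's buffer, which meets neither the stack nor `*f`
  have harena := hl.arena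
  have hkept : AllKept A.1.Blk v.mem s.mem := by
    apply AllKept.of_sameExcept harena.blkOK hs
    intro B hB w hw
    have hin := arena_inside harena hB
    have hx := harena.AR1x
    have hout := hh.objOut
    simp only [Vorbis.Off.sizeof.stb_vorbis] at hout
    simp only [segSpans, List.mem_cons, List.mem_nil_iff, or_false] at hw
    rcases hw with rfl | rfl | rfl
    · simp only []
      omega
    · simp only []
      omega
    · simp only []
      omega
  have hconsts : SDFrameConsts 12 s.mem g.R := hl.consts.frame hslots (by omega)
  have hlate := late_frame hl hobj hkept hconsts hun
  refine ⟨?_, hlate, hobj, hkept, hslots⟩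
  have rd : ∀ off : Nat, 8 ≤ off → off + 8 ≤ 0x5d0 → s.mem.u64 (g.R + off) = v.mem.u64 (g.R + off) := by
    intro off h1 h2
    exact r17_read hs (g.R + off) 8 (by omega) (by omega) (by omega)
  refine
    { entry := hfr.entry
      rip := hrip
      rsp := hrsp
      shadowIdx := by rw [rd 8 (by omega) (by omega)]; exact hfr.shadowIdx
      saved_rbx := by rw [rd 0x598 (by omega) (by omega)]; exact hfr.saved_rbx
      saved_rbp := by rw [rd 0x5a0 (by omega) (by omega)]; exact hfr.saved_rbp
      saved_r12 := by rw [rd 0x5a8 (by omega) (by omega)]; exact hfr.saved_r12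
      saved_r13 := by rw [rd 0x5b0 (by omega) (by omega)]; exact hfr.saved_r13
      saved_r14 := by rw [rd 0x5b8 (by omega) (by omega)]; exact hfr.saved_r14
      saved_r15 := by rw [rd 0x5c0 (by omega) (by omega)]; exact hfr.saved_r15
      saved_ra := by rw [rd 0x5c8 (by omega) (by omega)]; exact hfr.saved_ra
      code := hcode
      inv := hinv
      shadow := hfr.shadow.untouched hun
      offText := hfr.offText
      ext := hfr.ext
      callers := hfr.callers
      sh7 := ?_
      same := ?_ }
  · -- the global `log2_4` lies below `*f` and off the stack
    intro j hj
    rw [← hfr.sh7 j hj]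
    have e : Vorbis.Globals.log2_4.beg = 0x120640 := rfl
    rw [e]
    apply hs.readLE _ 1
    · rw [UInt64.toNat_ofNat']
      omega
    · intro w hw
      rw [UInt64.toNat_ofNat']
      simp only [segSpans, List.mem_cons, List.mem_nil_iff, or_false] at hw
      rcases hw with rfl | rfl | rfl
      · simp only []
        omega
      · simp only []
        omega
      · simp only []
        omega
  · -- the function's footprint
    apply hfr.same.step_same hs
    intro w hw a h1 h2
    simp only [segSpans, List.mem_cons, List.mem_nil_iff, or_false] at hw
    have hfg : (g.e.reg .rdi).toNat = g.f := rfl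
    rcases hw with rfl | rfl | rfl
    · refine ⟨⟨g.RA - depth, g.RA⟩, List.mem_cons_self, ?_, ?_⟩
      · simp only [depth] at h1 ⊢
        omega
      · simp only [] at h2 ⊢
        omega
    · refine ⟨(objBlock (g.e.reg .rdi).toNat).span, List.mem_cons_of_mem _ List.mem_cons_self, ?_, ?_⟩
      · simp only [vblock, voff, hfg] at h1 ⊢
        omega
      · simp only [vblock, voff, hfg] at h2 ⊢
        omega
    · refine ⟨(objBlock (g.e.reg .rdi).toNat).span, List.mem_cons_of_mem _ List.mem_cons_self, ?_, ?_⟩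
      · simp only [vblock, voff, hfg] at h1 ⊢
        omega
      · simp only [vblock, voff, hfg] at h2 ⊢
        omega



/-- **`max_part_read` reads the same** after the segment's stores: `blocksize_1`, the residue fields of `*f` and the
`residue_config` block are kept (the argument of `T1.transfer`, without `temp_memory_required`). -/
theorem maxPartRead_frame {Blk : Block → Prop} {mem mem' : Mem} {f n : Nat} (hR : ResidueOK Blk mem f)
    (he : ObjEq r17Wins mem f mem' f) (hk : ∀ B, Blk B → B.Kept mem mem')
    (hn : (n : Int) ≤ stb_vorbis.residue_count mem f) :
    maxPartRead mem' f n = maxPartRead mem f n ∧ bsize mem' f 1 = bsize mem f 1 ∧ nchan mem' f = nchan mem f ∧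
      stb_vorbis.residue_count mem' f = stb_vorbis.residue_count mem f := by
  have h1 := hR.R1
  have hC : stb_vorbis.channels mem' f = stb_vorbis.channels mem f := by
    simp only [vacc, voff]
    exact he.i32 4 (by decide)
  have hb1 : stb_vorbis.blocksize_1 mem' f = stb_vorbis.blocksize_1 mem f := by
    simp only [vacc, voff]
    exact he.i32 156 (by decide)
  have ecount : stb_vorbis.residue_count mem' f = stb_vorbis.residue_count mem f := by
    simp only [vacc, voff]
    exact he.i32 320 (by decide)
  have econf : stb_vorbis.residue_config mem' f = stb_vorbis.residue_config mem f := by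
    simp only [vacc, voff]
    exact he.u64 456 (by decide)
  have eb1 : bsize mem' f 1 = bsize mem f 1 := by
    rw [bsize_one, bsize_one, hb1]
  have eC : nchan mem' f = nchan mem f := by
    rw [nchan_def, nchan_def, hC]
  have hconf := hk _ hR.R2
  refine ⟨?_, eb1, eC, ecount⟩
  apply Res.maxUpTo_congr
  intro i hi
  have et : stb_vorbis.residue_types mem' f i = stb_vorbis.residue_types mem f i := by
    simp only [vacc, voff]
    have hw : InWins r17Wins (324 + 2 * i) 2 := by
      apply InWins.of_mem (144, 1808) (by decide)
      · show 144 ≤ 324 + 2 * i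
        omega
      · show 324 + 2 * i + 2 ≤ 1808
        omega
    exact he.u16_at (324 + 2 * i) hw (by omega) (by omega)
  have eat : stb_vorbis.residue_config_at mem' f i = stb_vorbis.residue_config_at mem f i := by
    unfold stb_vorbis.residue_config_at
    rw [econf]
  have hr : (Block.mk (stb_vorbis.residue_config_at mem f i) Off.sizeof.Residue).Kept mem mem' := by
    apply hconf.mono
    · simp only [vacc, voff]
      omega
    · simp only [vacc, voff] at hi hn h1 ⊢
      omega
  have eb : Residue.begin mem' (stb_vorbis.residue_config_at mem f i)
      = Residue.begin mem (stb_vorbis.residue_config_at mem f i) := by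
    simp only [Residue.begin, voff]
    exact hr.u32 _ (by simp only []; omega) (by simp only [voff]; omega)
  have ee : Residue.end_ mem' (stb_vorbis.residue_config_at mem f i)
      = Residue.end_ mem (stb_vorbis.residue_config_at mem f i) := by
    simp only [Residue.end_, voff]
    exact hr.u32 _ (by simp only []; omega) (by simp only [voff]; omega)
  have ep : Residue.part_size mem' (stb_vorbis.residue_config_at mem f i)
      = Residue.part_size mem (stb_vorbis.residue_config_at mem f i) := by
    simp only [Residue.part_size, voff]
    exact hr.u32 _ (by simp only []; omega) (by simp only [voff]; omega)
  unfold Residue.partReadEst Residue.partRead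
  rw [eat, eb, ee, ep, et, eb1]

/-- A non-negative `int` field: its unsigned reading is the same number, below `2^31`. -/
theorem nat_of_i32 (mem : Mem) (a : Nat) (h : 0 ≤ mem.i32 a) :
    ∃ n : Nat, mem.u32 a = n ∧ mem.i32 a = (n : Int) ∧ n < 2 ^ 31 := by
  have hc := mem.i32_cases a
  refine ⟨mem.u32 a, rfl, ?_, ?_⟩
  · omega
  · omega

/-- `movsxd` of a non-negative `int` loaded from memory: the number itself. -/
theorem sext_nat (n : Nat) (h : n < 2 ^ 31) : Word.ofBV (BitVec.signExtend 64 (BitVec.ofNat 32 n)) = addr n := by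
  apply UInt64.toNat_inj.mp
  have e : (BitVec.ofNat 32 n).toNat = n := by
    rw [BitVec.toNat_ofNat]
    exact Nat.mod_eq_of_lt (by omega)
  rw [toNat_sext32 _ (by rw [e]; exact h), e, toNat_addr _ (by omega)]

/-- A 32-bit load, zero-extended: the number itself. -/
theorem zext_nat (n : Nat) (h : n < 2 ^ 32) : Word.ofBV (BitVec.ofNat 32 n) = addr n := by
  apply UInt64.toNat_inj.mp
  rw [toNat_ofBV32, BitVec.toNat_ofNat, toNat_addr _ (by omega)]
  exact Nat.mod_eq_of_lt h

/-- `classify_mem` as the code computes it (`movsxd r14, [P] ; add r14, 1 ; imul r14d, [C] ; shl r14d, 3`) does not wrap. -/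
theorem classify_val (P C : Nat) (hP : P ≤ 8192) (hC : C ≤ 16) :
    ((Word.part .w32 (addr P + 1) * BitVec.ofNat 32 C) <<< 3).toNat = (P + 1) * C * 8 := by
  have e1 : (1 : Word).toNat = 1 := rfl
  have hx : (P + 1) * C ≤ 8193 * 16 := Nat.mul_le_mul (by omega) hC
  rw [BitVec.toNat_shiftLeft, BitVec.toNat_mul, toNat_part32, UInt64.toNat_add, toNat_addr _ (by omega), e1,
    BitVec.toNat_ofNat, Nat.shiftLeft_eq]
  have e2 : (P + 1) % 2 ^ 64 % 2 ^ 32 = P + 1 := by omega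
  have e3 : C % 2 ^ 32 = C := by omega
  rw [e2, e3]
  generalize (P + 1) * C = x at hx ⊢
  simp only [Width.bits]
  omega

/-- **The invariant of loop 4189 after the segment's footprint**: the counter and the estimate slots, `residue_count`,
`blocksize_1` and `max_part_read` read the same; the three registers are untouched. -/
theorem estLoop_carry {u₀ : State} {g : Ghost} {pc pc' : Word} {i : Nat} {A9 A10 : Arena} {A : Arena × List Obj} {v s : State}
    (hb : EstLoop u₀ g pc i A9 A10 A v) (hfr' : Frame u₀ g pc' A s) (hlate' : Late g 12 A9 A10 A s.mem)
    (hobj : ObjEq r17Wins v.mem g.f s.mem g.f) (hkept : AllKept A.1.Blk v.mem s.mem)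
    (hslots : Mem.EqOn (g.R + 8) (g.R + 0x28) v.mem s.mem)
    (hrbp : s.reg .rbp = v.reg .rbp) (hr13 : s.reg .r13 = v.reg .r13) (hr15 : s.reg .r15 = v.reg .r15) :
    EstLoop u₀ g pc' i A9 A10 A s := by
  have hres := hb.late.own.cfg.residue (by omega)
  have hup : ∀ B, A9.Blk B → B.Kept v.mem s.mem := fun B hB => hkept B (hb.late.own.up9 B hB)
  obtain ⟨eP, eb1, _, erc⟩ := maxPartRead_frame hres hobj hup hb.i_le
  obtain ⟨hR1, _⟩ := hfr'.r_eq
  obtain ⟨_, _, htop⟩ := hfr'.ra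
  simp only [steady] at hR1
  have hR : g.R + 0x28 ≤ 2 ^ 64 := by omega
  have e24 : StartDecoder.slot g s.mem 0x24 = StartDecoder.slot g v.mem 0x24 := hslots.u32 (g.R + 0x24) (by omega) (by omega) hR
  have e10 : StartDecoder.slot g s.mem 0x10 = StartDecoder.slot g v.mem 0x10 := hslots.u32 (g.R + 0x10) (by omega) (by omega) hR
  refine ⟨hfr', hb.hand, hlate', ?_, ?_, ?_, ?_, ?_, ?_⟩
  · rw [hrbp]
    exact hb.rbp
  · rw [e24]
    exact hb.cnt
  · rw [erc]
    exact hb.i_le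
  · rw [e10, eP]
    exact hb.est
  · rw [hr15, eb1]
    exact hb.r15
  · rw [hr13, eb1]
    exact hb.r13

/-- The signed compare of two small `int`s loaded from memory, as numbers. -/
theorem r17_toInt (n : Nat) (h : n < 2 ^ 31) : (BitVec.ofNat 32 n).toInt = (n : Int) := by
  rw [toInt_ofNat32 n (by omega)]
  have := sint32_cases n
  omega

/-- **The exit to R19**: T1 (`temp_memory_required = max(8·C·(P+1), 2·b1)`, the value `x` just stored) and the final test of
ARENA-FIX 1, in the memory `mem'` after the segment's stores; `mem` is the memory at the head, where the loop's invariant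
gives `P`, and the loop has ended (`i = residue_count`). -/
theorem r19_exit {g : Ghost} {A9 A10 : Arena} {A : Arena × List Obj} {mem mem' : Mem} {i P C b1 x : Nat}
    (hl : Late g 12 A9 A10 A mem) (hl' : Late g 12 A9 A10 A mem')
    (hobj : ObjEq r17Wins mem g.f mem' g.f) (hkept : AllKept A.1.Blk mem mem')
    (hi : stb_vorbis.residue_count mem g.f = (i : Int))
    (hP : maxPartRead mem g.f i = P) (hC : nchan mem g.f = C) (hb1 : bsize mem g.f 1 = b1)
    (hx : mem'.u32 (g.f + 12) = x) (hmax : x = max ((P + 1) * C * 8) (2 * b1))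
    (hfit : A.1.S + x + 1872 ≤ A.1.T) : T1 mem' g.f ∧ FinalTest mem' g.f := by
  have hres := hl.own.cfg.residue (by omega)
  have hup : ∀ B, A9.Blk B → B.Kept mem mem' := fun B hB => hkept B (hl.own.up9 B hB)
  obtain ⟨eP, eb1, eC, erc⟩ := maxPartRead_frame hres hobj hup (n := i) (by omega)
  have e : stb_vorbis.temp_memory_required mem' g.f = mem'.u32 (g.f + 12) := by
    simp only [vacc, voff]
  have en : (stb_vorbis.residue_count mem' g.f).toNat = i := by
    rw [erc, hi]
    exact Int.toNat_natCast i
  constructor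
  · apply T1.of_loop
    rw [e, hx, en, eP, hP, eC, hC, eb1, hb1]
    exact hmax
  · have har := hl'.arena
    have hTL := har.T_eq_L_of_nil hl'.noTemps
    have h1 := har.AR5.setup
    have h2 := har.AR5.temp
    have h3 := har.AR5.length
    constructor
    · have et : Vorbis.tmr mem' g.f = x := by
        unfold Vorbis.tmr
        rw [e, hx]
      rw [h1, h2, et]
      omega
    · rw [h2, h3, hTL]

/-- **The final test as the code computes it** (`movsxd rdx, [S] ; mov eax, [tmr] ; lea r13, [rdx + rax + 750H] ; mov eax, [T] ;
cmp rax, r13 ; jae`), as numbers: a 64-bit unsigned compare that cannot wrap. -/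
theorem fit_val (S y T : Nat) (hS : S < 2 ^ 31) (hy : y < 2 ^ 32) (hT : T < 2 ^ 32)
    (h : (Word.ofBV (BitVec.signExtend 64 (BitVec.ofNat 32 S)) + Word.ofBV (BitVec.ofNat 32 (y % 4294967296)) + 1872).toNat ≤
      (BitVec.setWidth 64 (BitVec.ofNat 32 T)).toNat) : S + y + 1872 ≤ T := by
  have e : y % 4294967296 = y := Nat.mod_eq_of_lt hy
  rw [e, sext_nat S hS, zext_nat y hy] at h
  simp only [vfield] at h
  rw [toNat_addr _ (by omega), BitVec.toNat_setWidth, BitVec.toNat_ofNat] at h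
  omega

/-- The low half of `r13 = 2·blocksize_1`. -/
theorem part_2b1 (b1 : Nat) (h : b1 ≤ 8192) : (Word.part .w32 (addr (2 * b1))).toNat = 2 * b1 := by
  rw [toNat_part32, toNat_addr _ (by omega)]
  omega

end Vorbis.Spec.start_decoder_R17
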